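-- pv_equiv track=rewrite | github.com/donghyeok1/algorithm | programmers/programmers31.py | rec
-- ===== SOURCE A (Python) =====
-- def rec(w):
--     if w == "":
--         return ""
--     start = 0
--     end = 0
--     u = ""
--     v = ""
--
--     for i in range(len(w)):
--         if w[i] == "(":
--             start += 1
--         else:
--             end += 1
--         u += w[i]
--         if start == end:
--             if i != len(w) - 1:
--                 v = w[i + 1 : ]
--                 break
--             else:
--                 v = ""
--     stack = []
--     flag = True
--     for i in u:
--         if i == "(":
--             stack.append(i)
--         else:
--             if not stack:
--                 flag = False
--                 break
--             else:
--                 stack.pop()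
--     if flag:
--         # 올바른 문자열
--         ans = rec(v)
--         return u + ans
--     else:
--         # 올바르지 않은 문자열
--         temp = "("
--         ans = rec(v)
--         temp = temp + ans + ")"
--         new_u = u[1:-1]
--         new_temp = ""
--         for i in new_u:
--             if i == "(":
--                 new_temp += ")"
--             else:
--                 new_temp += "("
--         temp += new_temp
--
--         return temp
-- ===== SOURCE B (Python) =====
-- def rec(w):
--     # Iterative alternative: scan balanced-count segments left to right with a
--     # counter; valid segments go straight to the output, invalid ones emit '('
--     # and push a closing paren plus the flipped interior onto a pending stack appended at the end.
--     n = len(w)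
--     out = []
--     pending = []
--     i = 0
--     while i < n:
--         bal = 0
--         valid = True
--         j = i
--         while j < n:
--             if w[j] == '(':
--                 bal += 1
--             else:
--                 bal -= 1
--             if bal < 0:
--                 valid = False
--             j += 1
--             if bal == 0:
--                 break
--         if valid:
--             out.append(w[i:j])
--         else:
--             out.append('(')
--             pending.append(')' + ''.join(')' if c == '(' else '(' for c in w[i + 1:j - 1]))
--         i = j
--     out.extend(reversed(pending))
--     return ''.join(out)
-- ===== Notes on version B (the rewrite author's own statement) =====
-- stated objective: alternative
-- what changed: Replaced A's recursive divide-and-conquer (string slicing, char-by-char concatenation and a re-scan per segment) with a single left-to-right index scan that emits each balanced segment directly and pushes the closing-paren-plus-flipped-interior suffixes on a pending stack appended at the end.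
import Mathlib
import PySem

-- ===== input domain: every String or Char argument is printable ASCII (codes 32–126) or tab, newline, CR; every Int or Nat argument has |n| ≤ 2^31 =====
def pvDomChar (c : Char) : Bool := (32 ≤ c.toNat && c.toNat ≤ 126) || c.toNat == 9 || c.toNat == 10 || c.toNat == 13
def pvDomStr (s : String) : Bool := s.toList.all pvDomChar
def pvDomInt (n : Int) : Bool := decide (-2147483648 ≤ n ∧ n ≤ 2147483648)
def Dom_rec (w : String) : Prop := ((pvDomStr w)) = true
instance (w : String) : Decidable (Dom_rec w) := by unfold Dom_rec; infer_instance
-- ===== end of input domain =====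

-- B replaces A's slice-and-recurse divide-and-conquer with a single left-to-right
-- segment scan and a pending-suffix stack (list builder, no slicing recursion); objective: alternative.


-- ===== PORT A =====

-- A's first for-loop: walks w accumulating u (u += w[i]) and the '('/other counters,
-- breaking at the first index where start == end (v = w[i+1:], i.e. the rest of the list);
-- if that only happens at the last index (or never), v = "".
def splitA : List Char → Int → Int → List Char → List Char × List Char
  | [], _, _, u => (u, [])
  | c :: rest, start, e, u =>
      let start' := if c = '(' then start + 1 else start
      let e' := if c = '(' then e else e + 1
      let u' := u ++ [c]
      if start' = e' then
        if rest ≠ [] then (u', rest) else (u', [])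
      else splitA rest start' e' u'

-- A's second loop: the stack check setting flag.
def checkA : List Char → List Char → Bool
  | [], _ => true
  | c :: r, stack =>
      if c = '(' then checkA r (c :: stack)
      else
        match stack with
        | [] => false
        | _ :: st => checkA r st

-- A's last loop: new_temp built from new_u by flipping each parenthesis.
def flipA : List Char → List Char
  | [] => []
  | c :: r => (if c = '(' then ')' else '(') :: flipA r

-- termination helper cited by recA's decreasing_by: v is strictly shorter than w.
theorem splitA_snd_length_lt (cs : List Char) (s e : Int) (u : List Char) (h : cs ≠ []) :
    (splitA cs s e u).2.length < cs.length := by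
  induction cs generalizing s e u with
  | nil => exact absurd rfl h
  | cons c rest ih =>
      simp only [splitA]
      by_cases hz : (if c = '(' then s + 1 else s) = (if c = '(' then e else e + 1)
      · rw [if_pos hz]
        by_cases hr : rest = []
        · subst hr; simp
        · rw [if_pos hr]; simp
      · rw [if_neg hz]
        by_cases hr : rest = []
        · subst hr; simp [splitA]
        · exact Nat.lt_succ_of_lt (ih _ _ _ hr)

def recA (cs : List Char) : List Char :=
  if cs = [] then []
  else
    let p := splitA cs 0 0 []
    if checkA p.1 [] then p.1 ++ recA p.2
    else '(' :: (recA p.2 ++ ')' :: flipA (PySem.List.slice p.1 (some 1) (some (-1))))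
termination_by cs.length
decreasing_by all_goals exact splitA_snd_length_lt cs 0 0 [] (by assumption)

def rec (w : String) : String := String.ofList (recA w.toList)

-- ===== PORT B =====

-- B's inner while: consume chars of the current segment updating bal (and valid when
-- bal dips below 0), stopping when bal == 0; returns (segment, rest, bal, valid).
def scanB : List Char → Int → Bool → List Char × List Char × Int × Bool
  | [], bal, valid => ([], [], bal, valid)
  | c :: cs, bal, valid =>
      let bal' := if c = '(' then bal + 1 else bal - 1
      let valid' := if bal' < 0 then false else valid
      if bal' = 0 then ([c], cs, bal', valid')
      else
        let r := scanB cs bal' valid'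
        (c :: r.1, r.2.1, r.2.2.1, r.2.2.2)

theorem scanB_rest_length_lt (cs : List Char) (bal : Int) (valid : Bool) (h : cs ≠ []) :
    (scanB cs bal valid).2.1.length < cs.length := by
  induction cs generalizing bal valid with
  | nil => exact absurd rfl h
  | cons c rest ih =>
      simp only [scanB]
      by_cases hz : (if c = '(' then bal + 1 else bal - 1) = 0
      · rw [if_pos hz]; simp
      · rw [if_neg hz]
        by_cases hr : rest = []
        · subst hr; simp [scanB]
        · exact Nat.lt_succ_of_lt (ih _ _ hr)

-- B's outer while: out collects pieces, pending collects the flipped-interior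
-- suffixes (appended at the end in reverse, as out.extend(reversed(pending))).
def loopB (cs : List Char) (out pending : List (List Char)) : List Char :=
  if cs = [] then (out ++ pending.reverse).flatten
  else
    let r := scanB cs 0 true
    if r.2.2.2 then loopB r.2.1 (out ++ [r.1]) pending
    else
      loopB r.2.1 (out ++ [['(']])
        (pending ++ [')' :: (PySem.List.slice r.1 (some 1) (some (-1))).map
          (fun c => if c = '(' then ')' else '(')])
termination_by cs.length
decreasing_by all_goals exact scanB_rest_length_lt cs 0 true (by assumption)

def rec_alt (w : String) : String := String.ofList (loopB w.toList [] [])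

-- ===== PRECONDITION & SPEC =====
def Spec_rec (w : String) (out : String) : Prop := out = rec_alt w
instance (w : String) (out : String) : Decidable (Spec_rec w out) := by unfold Spec_rec; infer_instance

-- ===== CLAIM (what is proved, stated in full; the proofs are below) =====
def Claim_equal_rec : Prop := ∀ (w : String), Dom_rec w → Spec_rec w (rec w)

-- ===== LEMMAS AND PROOFS =====

-- proof-layer descriptions of scanB's segment and rest (independent of the valid flag)
def segOf : List Char → Int → List Char
  | [], _ => []
  | c :: cs, bal =>
      let bal' := if c = '(' then bal + 1 else bal - 1
      if bal' = 0 then [c] else c :: segOf cs bal'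

def restOf : List Char → Int → List Char
  | [], _ => []
  | c :: cs, bal =>
      let bal' := if c = '(' then bal + 1 else bal - 1
      if bal' = 0 then cs else restOf cs bal'

theorem scanB_fst (cs : List Char) : ∀ (bal : Int) (v : Bool),
    (scanB cs bal v).1 = segOf cs bal := by
  induction cs with
  | nil => intro bal v; rfl
  | cons c rest ih =>
      intro bal v
      simp only [scanB, segOf]
      by_cases hz : (if c = '(' then bal + 1 else bal - 1) = 0
      · rw [if_pos hz, if_pos hz]
      · rw [if_neg hz, if_neg hz, ih]

theorem scanB_rest (cs : List Char) : ∀ (bal : Int) (v : Bool),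
    (scanB cs bal v).2.1 = restOf cs bal := by
  induction cs with
  | nil => intro bal v; rfl
  | cons c rest ih =>
      intro bal v
      simp only [scanB, restOf]
      by_cases hz : (if c = '(' then bal + 1 else bal - 1) = 0
      · rw [if_pos hz, if_pos hz]
      · rw [if_neg hz, if_neg hz, ih]

theorem flipA_eq_map (l : List Char) :
    flipA l = l.map (fun c => if c = '(' then ')' else '(') := by
  induction l with
  | nil => rfl
  | cons c r ih => simp [flipA, ih]

-- A's first loop computes exactly B's (segment, rest) split.
theorem splitA_eq (cs : List Char) : ∀ (s e : Int) (u : List Char),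
    splitA cs s e u = (u ++ segOf cs (s - e), restOf cs (s - e)) := by
  induction cs with
  | nil => intro s e u; simp [splitA, segOf, restOf]
  | cons c rest ih =>
      intro s e u
      simp only [splitA, segOf, restOf]
      by_cases hc : c = '('
      · simp only [if_pos hc]
        by_cases hz : s + 1 = e
        · have hb : s - e + 1 = 0 := by omega
          rw [if_pos hz]
          cases rest with
          | nil => simp [hb]
          | cons d r => simp [hb]
        · rw [if_neg hz, ih]
          have hb : s + 1 - e = s - e + 1 := by omega
          have hnz : ¬ s - e + 1 = 0 := by omega
          simp [hb, hnz]
      · simp only [if_neg hc]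
        by_cases hz : s = e + 1
        · have hb : s - e - 1 = 0 := by omega
          rw [if_pos hz]
          cases rest with
          | nil => simp [hb]
          | cons d r => simp [hb]
        · rw [if_neg hz, ih]
          have hb : s - (e + 1) = s - e - 1 := by omega
          have hnz : ¬ s - e - 1 = 0 := by omega
          simp [hb, hnz]

-- checkA's stack only matters through its length.
def balCheck : List Char → Nat → Bool
  | [], _ => true
  | c :: r, k =>
      if c = '(' then balCheck r (k + 1)
      else match k with
        | 0 => false
        | k' + 1 => balCheck r k'

theorem checkA_eq_balCheck (u : List Char) : ∀ (st : List Char),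
    checkA u st = balCheck u st.length := by
  induction u with
  | nil => intro st; rfl
  | cons c r ih =>
      intro st
      by_cases hc : c = '('
      · simpa [checkA, balCheck, hc] using ih (c :: st)
      · cases st with
        | nil => simp [checkA, balCheck, hc]
        | cons x st' => simpa [checkA, balCheck, hc] using ih st'

theorem scanB_valid_false (cs : List Char) : ∀ (bal : Int),
    (scanB cs bal false).2.2.2 = false := by
  induction cs with
  | nil => intro bal; rfl
  | cons c rest ih =>
      intro bal
      simp only [scanB]
      by_cases hz : (if c = '(' then bal + 1 else bal - 1) = 0
      · rw [if_pos hz]; simp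
      · rw [if_neg hz]; simp only [ite_self]; exact ih _

-- B's valid flag is exactly A's stack check on the segment.
theorem scanB_valid_eq (cs : List Char) : ∀ (bal : Int), 0 ≤ bal → ∀ (v : Bool),
    (scanB cs bal v).2.2.2 = (v && balCheck (segOf cs bal) bal.toNat) := by
  induction cs with
  | nil => intro bal _ v; simp [scanB, segOf, balCheck]
  | cons c rest ih =>
      intro bal hb v
      simp only [scanB, segOf]
      by_cases hc : c = '('
      · simp only [if_pos hc]
        have h1 : ¬ bal + 1 < 0 := by omega
        have h2 : ¬ bal + 1 = 0 := by omega
        rw [if_neg h2, if_neg h2]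
        simp only [if_neg h1]
        rw [ih (bal + 1) (by omega) v]
        have ht : (bal + 1).toNat = bal.toNat + 1 := by omega
        simp [balCheck, hc, ht]
      · simp only [if_neg hc]
        by_cases h0 : bal = 0
        · subst h0
          have h1 : (0 : Int) - 1 < 0 := by omega
          have h2 : ¬ (0 : Int) - 1 = 0 := by omega
          rw [if_neg h2, if_neg h2]
          simp only [if_pos h1]
          rw [scanB_valid_false]
          simp [balCheck, hc]
        · have h1 : ¬ bal - 1 < 0 := by omega
          have hk : bal.toNat = (bal.toNat - 1) + 1 := by omega
          by_cases h2 : bal - 1 = 0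
          · rw [if_pos h2, if_pos h2]
            simp only [if_neg h1]
            rw [hk]
            simp [balCheck, hc]
          · rw [if_neg h2, if_neg h2]
            simp only [if_neg h1]
            rw [ih (bal - 1) (by omega) v]
            have ht : (bal - 1).toNat = bal.toNat - 1 := by omega
            rw [hk]
            simp [balCheck, hc, ht]

theorem loopB_eq (n : Nat) : ∀ (cs : List Char), cs.length ≤ n → ∀ (out pending : List (List Char)),
    loopB cs out pending = out.flatten ++ recA cs ++ pending.reverse.flatten := by
  induction n with
  | zero =>
      intro cs hn out pending
      have : cs = [] := List.eq_nil_of_length_eq_zero (Nat.le_zero.mp hn)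
      subst this
      simp [loopB, recA]
  | succ n ih =>
      intro cs hn out pending
      by_cases h : cs = []
      · subst h; simp [loopB, recA]
      · rw [loopB, recA]
        simp only [if_neg h]
        have hrest : (scanB cs 0 true).2.1.length ≤ n := by
          have := scanB_rest_length_lt cs 0 true h
          omega
        have hsplit : splitA cs 0 0 [] = (segOf cs 0, restOf cs 0) := by
          simpa using splitA_eq cs 0 0 []
        have hcheck : checkA (splitA cs 0 0 []).1 [] = (scanB cs 0 true).2.2.2 := by
          rw [hsplit, checkA_eq_balCheck, scanB_valid_eq cs 0 (by omega) true]
          simp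
        rw [hcheck]
        by_cases hv : (scanB cs 0 true).2.2.2 = true
        · simp only [hv]
          rw [ih _ hrest]
          rw [scanB_rest, scanB_fst, hsplit]
          simp
        · simp only [Bool.not_eq_true] at hv
          rw [hv]
          simp only [Bool.false_eq_true, if_neg (by simp : ¬ False)]
          rw [ih _ hrest]
          rw [scanB_rest, scanB_fst, hsplit]
          simp [flipA_eq_map]

-- ===== VERDICT (by name: the statement is the Claim_ definition above) =====
theorem rec_spec : Claim_equal_rec := by
  intro w _
  unfold Spec_rec rec rec_alt
  rw [loopB_eq w.toList.length w.toList (le_refl _) [] []]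
  simp
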